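-- pv_equiv track=rewrite | github.com/alexspetty/nfield | experiments/factor_from_deranging.py | deranging_set_direct
-- ===== SOURCE A (Python) =====
-- import math
--
-- def deranging_set_direct(n, b):
--     deranging = []
--     for g in range(2, n):
--         if math.gcd(g, n) != 1:
--             continue
--         C = 0
--         for r in range(1, n):
--             if math.gcd(r, n) != 1:
--                 continue
--             if b * r // n == b * (g * r % n) // n:
--                 C += 1
--                 break  # one collision suffices to prove non-deranging
--         if C == 0:
--             deranging.append(g)
--     return deranging
-- ===== SOURCE B (Python) =====
-- import math
--
--
-- def deranging_set_direct(n, b):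
--     # Elimination sieve: start from all candidate multipliers and, sweeping the
--     # residues r once, strike out every candidate that collides at r; whatever
--     # survives the sweep is the deranging set.
--     alive = [g for g in range(2, n) if math.gcd(g, n) == 1]
--     for r in range(1, n):
--         if not alive:
--             break
--         if math.gcd(r, n) != 1:
--             continue
--         br = b * r // n
--         alive = [g for g in alive if b * (g * r % n) // n != br]
--     return alive
-- ===== Notes on version B (the rewrite author's own statement) =====
-- stated objective: alternative
-- what changed: B inverts A's control structure into an elimination sieve: instead of scanning residues per candidate g with an early break, it sweeps the residues r once, computing gcd(r,n) and the bucket b*r//n once per r, and filters a shrinking survivor list of candidates, returning what survives the sweep.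
import Mathlib
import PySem

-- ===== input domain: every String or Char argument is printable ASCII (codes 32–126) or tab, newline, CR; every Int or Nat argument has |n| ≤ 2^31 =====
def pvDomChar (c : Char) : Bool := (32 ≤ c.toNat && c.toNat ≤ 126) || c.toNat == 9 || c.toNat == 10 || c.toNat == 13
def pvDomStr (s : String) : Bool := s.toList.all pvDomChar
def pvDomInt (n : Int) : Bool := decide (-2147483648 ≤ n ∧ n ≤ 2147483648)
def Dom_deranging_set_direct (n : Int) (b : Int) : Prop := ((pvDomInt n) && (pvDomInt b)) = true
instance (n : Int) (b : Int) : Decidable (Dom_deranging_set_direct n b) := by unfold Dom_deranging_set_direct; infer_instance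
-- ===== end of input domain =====

-- B replaces A's per-candidate inner scan by an elimination sieve: one sweep over the
-- residues r strikes colliding candidates out of a shrinking survivor list (objective: alternative).

-- ===== PORT A =====
-- inner 'for r in range(1, n)' loop of A, with the early 'break' (returns the final C)
def pvInnerA (n b g : Int) : List Int → Int
  | [] => 0
  | r :: rs =>
    if Int.gcd r n ≠ 1 then pvInnerA n b g rs
    else if PySem.Int.floordiv (b * r) n ==
            PySem.Int.floordiv (b * (PySem.Int.mod (g * r) n)) n then 0 + 1
    else pvInnerA n b g rs

def deranging_set_direct (n : Int) (b : Int) : List Int :=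
  (PySem.List.pyRange 2 n 1).foldl (fun deranging g =>
    if Int.gcd g n ≠ 1 then deranging
    else if pvInnerA n b g (PySem.List.pyRange 1 n 1) = 0 then deranging ++ [g]
    else deranging) []

-- ===== PORT B =====
-- 'for r in range(1, n)' sweep over the residue list, carrying the survivor list 'alive';
-- 'if not alive: break' is the first branch, 'continue' on non-units the second
def pvSieve (n b : Int) : List Int → List Int → List Int
  | alive, [] => alive
  | alive, r :: rs =>
    if alive = [] then alive
    else if Int.gcd r n ≠ 1 then pvSieve n b alive rs
    else
      let br := PySem.Int.floordiv (b * r) n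
      pvSieve n b
        (alive.filter (fun g =>
          PySem.Int.floordiv (b * (PySem.Int.mod (g * r) n)) n ≠ br)) rs

def deranging_set_direct_alt (n : Int) (b : Int) : List Int :=
  pvSieve n b ((PySem.List.pyRange 2 n 1).filter (fun g => Int.gcd g n = 1))
    (PySem.List.pyRange 1 n 1)

-- ===== PRECONDITION & SPEC =====
def Spec_deranging_set_direct (n : Int) (b : Int) (out : List Int) : Prop := out = deranging_set_direct_alt n b
instance (n : Int) (b : Int) (out : List Int) : Decidable (Spec_deranging_set_direct n b out) := by unfold Spec_deranging_set_direct; infer_instance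

-- ===== CLAIM (what is proved, stated in full; the proofs are below) =====
def Claim_equal_deranging_set_direct : Prop := ∀ (n : Int) (b : Int), Dom_deranging_set_direct n b → Spec_deranging_set_direct n b (deranging_set_direct n b)

-- ===== LEMMAS AND PROOFS =====

-- A's inner loop returns 0 iff no coprime residue in the list collides
theorem pvInnerA_eq_zero (n b g : Int) (rs : List Int) :
    pvInnerA n b g rs = 0 ↔
      ∀ r ∈ rs, Int.gcd r n = 1 →
        PySem.Int.floordiv (b * (PySem.Int.mod (g * r) n)) n ≠
          PySem.Int.floordiv (b * r) n := by
  induction rs with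
  | nil => simp [pvInnerA]
  | cons r rs ih =>
    by_cases h1 : Int.gcd r n = 1
    · by_cases h2 : PySem.Int.floordiv (b * (PySem.Int.mod (g * r) n)) n =
          PySem.Int.floordiv (b * r) n
      · have hb : (PySem.Int.floordiv (b * r) n ==
            PySem.Int.floordiv (b * (PySem.Int.mod (g * r) n)) n) = true := by
          simp [h2]
        simp only [pvInnerA, h1, ne_eq, not_true_eq_false, if_false, hb, if_true]
        constructor
        · intro h; exact absurd h (by norm_num)
        · intro h; exact absurd h2 (h r (by simp) h1)
      · simp only [pvInnerA, h1, ne_eq, not_true_eq_false, if_false]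
        rw [if_neg (by simp; exact fun h => h2 h.symm), ih, List.forall_mem_cons]
        simp [h1, h2]
    · simp only [pvInnerA, if_pos (by simpa using h1)]
      rw [ih, List.forall_mem_cons]
      simp [h1]

-- the sieve strikes out exactly the candidates that collide at some coprime residue
theorem pvSieve_eq_filter (n b : Int) (rs alive : List Int) :
    pvSieve n b alive rs = alive.filter (fun g => decide
      (∀ r ∈ rs, Int.gcd r n = 1 →
        PySem.Int.floordiv (b * (PySem.Int.mod (g * r) n)) n ≠
          PySem.Int.floordiv (b * r) n)) := by
  induction rs generalizing alive with
  | nil => simp [pvSieve]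
  | cons r rs ih =>
    rcases eq_or_ne alive [] with rfl | hne
    · simp [pvSieve]
    · rw [pvSieve, if_neg hne]
      by_cases h1 : Int.gcd r n = 1
      · rw [if_neg (by simpa using h1), ih, List.filter_filter]
        apply List.filter_congr
        intro g _
        by_cases hq : PySem.Int.floordiv (b * (PySem.Int.mod (g * r) n)) n =
            PySem.Int.floordiv (b * r) n <;>
          simp [h1, hq]
      · rw [if_pos (by simpa using h1), ih]
        apply List.filter_congr
        intro g _
        simp [h1]

-- ===== VERDICT (by name: the statement is the Claim_ definition above) =====
theorem deranging_set_direct_spec : Claim_equal_deranging_set_direct := by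
  intro n b _
  unfold Spec_deranging_set_direct deranging_set_direct deranging_set_direct_alt
  have hstepA : (fun (deranging : List Int) (g : Int) =>
      if Int.gcd g n ≠ 1 then deranging
      else if pvInnerA n b g (PySem.List.pyRange 1 n 1) = 0 then deranging ++ [g]
      else deranging) =
      (fun deranging g =>
        if Int.gcd g n = 1 ∧ pvInnerA n b g (PySem.List.pyRange 1 n 1) = 0
        then deranging ++ [g] else deranging) := by
    funext acc g
    by_cases h1 : Int.gcd g n = 1 <;>
      by_cases h2 : pvInnerA n b g (PySem.List.pyRange 1 n 1) = 0 <;> simp [h1, h2]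
  rw [hstepA, PySem.List.foldl_append_ite_eq_filter, List.nil_append,
    pvSieve_eq_filter, List.filter_filter]
  apply List.filter_congr
  intro g _
  by_cases h1 : Int.gcd g n = 1
  · by_cases h2 : pvInnerA n b g (PySem.List.pyRange 1 n 1) = 0
    · have hd : decide (∀ r ∈ PySem.List.pyRange 1 n 1, Int.gcd r n = 1 →
          PySem.Int.floordiv (b * (PySem.Int.mod (g * r) n)) n ≠
            PySem.Int.floordiv (b * r) n) = true :=
        decide_eq_true ((pvInnerA_eq_zero n b g (PySem.List.pyRange 1 n 1)).mp h2)
      simp only [hd]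
      simp [h1, h2]
    · have : ¬ ∀ r ∈ PySem.List.pyRange 1 n 1, Int.gcd r n = 1 →
          PySem.Int.floordiv (b * (PySem.Int.mod (g * r) n)) n ≠
            PySem.Int.floordiv (b * r) n :=
        fun h => h2 ((pvInnerA_eq_zero n b g (PySem.List.pyRange 1 n 1)).mpr h)
      have hd : decide (∀ r ∈ PySem.List.pyRange 1 n 1, Int.gcd r n = 1 →
          PySem.Int.floordiv (b * (PySem.Int.mod (g * r) n)) n ≠
            PySem.Int.floordiv (b * r) n) = false := decide_eq_false this
      simp only [hd, Bool.false_and]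
      simp [h1, h2]
  · simp [h1]
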